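-- pv_equiv track=rewrite | github.com/messrobd/cs01-web-crawler | web_crawler.py | reachable_pages
-- ===== SOURCE A (Python) =====
-- def reachable_pages(page, graph, k): # k = depth
--     if k <= 0:
--         return [page] if page in graph[page] else []
--     reachable = []
--     outlinks = graph[page]
--     for outlink in outlinks:
--         if outlink != page:
--             reachable += [outlink]
--         reachable += reachable_pages(outlink, graph, k-1)
--     return reachable
-- ===== SOURCE B (Python) =====
-- def reachable_pages(page, graph, k):
--     # Iterative explicit-stack traversal instead of recursion.
--     # Each stack entry is (node, depth, emit): emit says whether to append
--     # the node itself (precomputed at push time as 'child != parent').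
--     result = []
--     stack = [(page, k, False)]
--     while stack:
--         node, depth, emit = stack.pop()
--         if emit:
--             result.append(node)
--         outs = graph[node]
--         if depth <= 0:
--             if node in outs:
--                 result.append(node)
--         else:
--             stack.extend((o, depth - 1, o != node) for o in reversed(outs))
--     return result
-- ===== Notes on version B (the rewrite author's own statement) =====
-- stated objective: alternative
-- what changed: Replaces the recursion with an iterative explicit-stack traversal over (node, depth, emit) tasks, children pushed reversed so pop order reproduces the recursive left-to-right emit order.
import Mathlib
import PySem

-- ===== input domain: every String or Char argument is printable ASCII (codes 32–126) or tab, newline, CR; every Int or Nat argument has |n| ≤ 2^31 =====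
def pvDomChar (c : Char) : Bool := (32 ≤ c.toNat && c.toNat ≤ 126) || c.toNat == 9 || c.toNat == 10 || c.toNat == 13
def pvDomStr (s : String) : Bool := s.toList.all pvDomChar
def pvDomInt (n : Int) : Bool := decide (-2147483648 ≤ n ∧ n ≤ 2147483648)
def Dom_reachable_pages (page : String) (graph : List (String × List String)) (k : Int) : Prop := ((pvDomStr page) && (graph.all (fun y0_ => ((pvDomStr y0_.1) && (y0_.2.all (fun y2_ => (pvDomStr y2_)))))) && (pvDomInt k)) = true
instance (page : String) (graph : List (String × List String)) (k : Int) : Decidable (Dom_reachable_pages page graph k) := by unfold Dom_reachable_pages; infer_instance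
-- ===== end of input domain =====

-- B replaces A's recursion with an iterative explicit-stack traversal (alternative decomposition, same cost).

-- ===== PORT A =====
-- Literal port of the recursion; graph[x] is the dict lookup, which Python
-- raises KeyError on when x is not a key — Pre_ excludes exactly those inputs
-- (the port returns [] on a missing key, a value the claim says nothing about).
def reachable_pages (page : String) (graph : List (String × List String)) (k : Int) : List String :=
  if h : k ≤ 0 then
    match (PySem.Dict.mk graph).get? page with
    | none => []
    | some outs => if outs.contains page then [page] else []
  else
    match (PySem.Dict.mk graph).get? page with
    | none => []
    | some outs =>
      outs.foldl (fun reachable outlink =>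
        (reachable ++ (if outlink != page then [outlink] else [])) ++
          reachable_pages outlink graph (k - 1)) []
termination_by k.toNat
decreasing_by omega

-- ===== PORT B =====
def pvMaxOut (graph : List (String × List String)) : Nat :=
  graph.foldl (fun m p => max m p.2.length) 0

-- the stack machine of Source B; the stack's top is the list head; the Nat fuel is
-- only a totality guard (the proofs show it never runs out)
def pvRunStack (graph : List (String × List String)) :
    Nat → List (String × Int × Bool) → List String → List String
  | 0, _, result => result
  | _ + 1, [], result => result
  | fuel + 1, (node, depth, emit) :: rest, result =>
    let result1 := if emit then result ++ [node] else result
    match (PySem.Dict.mk graph).get? node with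
    | none => pvRunStack graph fuel rest result1   -- Python raises KeyError; outside Pre_
    | some outs =>
      if depth ≤ 0 then
        pvRunStack graph fuel rest
          (if outs.contains node then result1 ++ [node] else result1)
      else
        pvRunStack graph fuel
          ((outs.map (fun o => (o, depth - 1, o != node))) ++ rest) result1

def reachable_pages_alt (page : String) (graph : List (String × List String)) (k : Int) : List String :=
  pvRunStack graph ((pvMaxOut graph + 1) ^ k.toNat) [(page, k, false)] []

-- ===== PRECONDITION & SPEC =====
-- one graph-theoretic expansion step of a node set: add the outlinks of every
-- member that is a key (deduplicated)
def pvExpand (graph : List (String × List String)) (S : List String) : List String :=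
  S.foldl (fun acc x =>
    acc ++ ((((PySem.Dict.mk graph).get? x).getD []).filter (fun o => !acc.contains o))) S

-- an upper bound on the number of distinct node names occurring in the input,
-- so iterating pvExpand that often reaches the bounded-reachability fixpoint
def pvNodeBound (graph : List (String × List String)) : Nat :=
  (graph.flatMap (fun p => p.1 :: p.2)).length + 1

-- Pre_ excludes EXACTLY the inputs on which the Python A raises KeyError: those
-- where some node reachable from page within k steps (through key nodes) is not
-- a key of graph; it is stated as a bounded graph closure over the input, and
-- B's Python raises KeyError on the same inputs.
def Pre_reachable_pages (page : String) (graph : List (String × List String)) (k : Int) : Prop :=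
  (((pvExpand graph)^[min k.toNat (pvNodeBound graph)] [page]).all
    (fun x => ((PySem.Dict.mk graph).get? x).isSome)) = true
instance (page : String) (graph : List (String × List String)) (k : Int) : Decidable (Pre_reachable_pages page graph k) := by unfold Pre_reachable_pages; infer_instance

def pvWitness_reachable_pages : String × (List (String × List String)) × Int :=
  ("a", [("a", ["b", "a"]), ("b", ["a"])], 2)

def Spec_reachable_pages (page : String) (graph : List (String × List String)) (k : Int) (out : List String) : Prop := out = reachable_pages_alt page graph k
instance (page : String) (graph : List (String × List String)) (k : Int) (out : List String) : Decidable (Spec_reachable_pages page graph k out) := by unfold Spec_reachable_pages; infer_instance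

-- ===== CLAIM (what is proved, stated in full; the proofs are below) =====
def Claim_equal_reachable_pages : Prop := ∀ (page : String) (graph : List (String × List String)) (k : Int), Dom_reachable_pages page graph k → Pre_reachable_pages page graph k → Spec_reachable_pages page graph k (reachable_pages page graph k)

-- ===== LEMMAS AND PROOFS =====

-- the value a single stack task contributes to the output
def pvSem (graph : List (String × List String)) (t : String × Int × Bool) : List String :=
  (if t.2.2 then [t.1] else []) ++ reachable_pages t.1 graph t.2.1

def pvWeight (M : Nat) (t : String × Int × Bool) : Nat := (M + 1) ^ t.2.1.toNat

def pvMeasure (graph : List (String × List String)) (stack : List (String × Int × Bool)) : Nat :=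
  (stack.map (pvWeight (pvMaxOut graph))).sum

theorem pv_outs_le_maxOut (graph : List (String × List String)) (n : String)
    (outs : List String) (h : (PySem.Dict.mk graph).get? n = some outs) :
    outs.length ≤ pvMaxOut graph := by
  have hmem : (n, outs) ∈ (PySem.Dict.mk graph).items :=
    PySem.Dict.mem_items_of_get?_eq_some _ h
  have hmem' : (n, outs) ∈ graph := hmem
  have := (PySem.List.le_foldl_max_nat graph (fun p => p.2.length) 0).2 (n, outs) hmem'
  simpa [pvMaxOut] using this

theorem pv_A_none (page : String) (graph : List (String × List String)) (k : Int)
    (h : (PySem.Dict.mk graph).get? page = none) :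
    reachable_pages page graph k = [] := by
  rw [reachable_pages]
  split <;> simp [h]

theorem pv_A_base (page : String) (graph : List (String × List String)) (k : Int)
    (hk : k ≤ 0) (outs : List String)
    (h : (PySem.Dict.mk graph).get? page = some outs) :
    reachable_pages page graph k = if outs.contains page then [page] else [] := by
  rw [reachable_pages]
  simp [hk, h]

theorem pv_A_step (page : String) (graph : List (String × List String)) (k : Int)
    (hk : ¬ k ≤ 0) (outs : List String)
    (h : (PySem.Dict.mk graph).get? page = some outs) :
    reachable_pages page graph k =
      outs.flatMap (fun o =>
        (if o != page then [o] else []) ++ reachable_pages o graph (k - 1)) := by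
  rw [reachable_pages]
  simp only [hk, dite_false, h]
  rw [show (fun (reachable : List String) (outlink : String) =>
        (reachable ++ (if outlink != page then [outlink] else [])) ++
          reachable_pages outlink graph (k - 1)) =
      (fun reachable outlink => reachable ++
        ((if outlink != page then [outlink] else []) ++
          reachable_pages outlink graph (k - 1))) from by
    funext a b; rw [List.append_assoc]]
  rw [PySem.List.foldl_append_eq_flatMap]
  simp

theorem pv_run_eq (graph : List (String × List String)) :
    ∀ (fuel : Nat) (stack : List (String × Int × Bool)) (result : List String),
      pvMeasure graph stack ≤ fuel →
      pvRunStack graph fuel stack result = result ++ stack.flatMap (pvSem graph) := by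
  intro fuel
  induction fuel with
  | zero =>
    intro stack result hm
    cases stack with
    | nil => simp [pvRunStack]
    | cons t rest =>
      exfalso
      have : 1 ≤ pvWeight (pvMaxOut graph) t := Nat.one_le_pow _ _ (Nat.succ_pos _)
      simp [pvMeasure] at hm
      omega
  | succ f ih =>
    intro stack result hm
    cases stack with
    | nil => simp [pvRunStack]
    | cons t rest =>
      obtain ⟨node, depth, emit⟩ := t
      have hw1 : 1 ≤ pvWeight (pvMaxOut graph) (node, depth, emit) :=
        Nat.one_le_pow _ _ (Nat.succ_pos _)
      have hmrest : pvMeasure graph rest ≤ f := by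
        simp [pvMeasure] at hm ⊢; unfold pvMeasure at *; omega
      have hres1 : (if emit then result ++ [node] else result) =
          result ++ (if emit then [node] else []) := by
        cases emit <;> simp
      rw [pvRunStack]
      cases hget : (PySem.Dict.mk graph).get? node with
      | none =>
        simp only [hget]
        rw [ih rest _ hmrest]
        simp [pvSem, pv_A_none _ _ _ hget, hres1, List.append_assoc]
      | some outs =>
        simp only [hget]
        by_cases hd : depth ≤ 0
        · simp only [hd, if_true]
          rw [ih rest _ hmrest]
          have hsem : pvSem graph (node, depth, emit) =
              (if emit then [node] else []) ++ (if outs.contains node then [node] else []) := by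
            simp [pvSem, pv_A_base node graph depth hd outs hget]
          rw [List.flatMap_cons, hsem]
          cases emit <;> by_cases hc : node ∈ outs <;> simp [hc]
        · simp only [hd, if_false]
          -- measure bookkeeping for the pushed tasks
          have hlen : outs.length ≤ pvMaxOut graph := pv_outs_le_maxOut graph node outs hget
          have htn : depth.toNat = (depth - 1).toNat + 1 := by omega
          have hpush : pvMeasure graph ((outs.map (fun o => (o, depth - 1, o != node))) ++ rest)
              ≤ f := by
            have hmap : ((outs.map (fun o => (o, depth - 1, o != node))).map
                (pvWeight (pvMaxOut graph))).sum
                = outs.length * (pvMaxOut graph + 1) ^ (depth - 1).toNat := by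
              rw [List.map_map]
              have : ((fun t => pvWeight (pvMaxOut graph) t) ∘
                  (fun o => (o, depth - 1, o != node))) =
                  (fun (_ : String) => (pvMaxOut graph + 1) ^ (depth - 1).toNat) := by
                funext o; rfl
              rw [this, List.map_const', List.sum_replicate, smul_eq_mul]
            have hW : pvWeight (pvMaxOut graph) (node, depth, emit)
                = (pvMaxOut graph + 1) * (pvMaxOut graph + 1) ^ (depth - 1).toNat := by
              show (pvMaxOut graph + 1) ^ depth.toNat = _
              rw [htn, pow_succ, Nat.mul_comm]
            have hmono : outs.length * (pvMaxOut graph + 1) ^ (depth - 1).toNat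
                ≤ pvMaxOut graph * (pvMaxOut graph + 1) ^ (depth - 1).toNat :=
              Nat.mul_le_mul_right _ hlen
            have hWpos : 1 ≤ (pvMaxOut graph + 1) ^ (depth - 1).toNat :=
              Nat.one_le_pow _ _ (Nat.succ_pos _)
            simp only [pvMeasure, List.map_append, List.sum_append] at hm ⊢
            rw [hmap]
            simp only [pvMeasure] at *
            simp only [List.map_cons, List.sum_cons] at hm
            rw [hW] at hm
            nlinarith
          rw [ih _ _ hpush]
          rw [List.flatMap_append, List.flatMap_cons]
          have hpushed : (outs.map (fun o => (o, depth - 1, o != node))).flatMap (pvSem graph)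
              = outs.flatMap (fun o =>
                  (if o != node then [o] else []) ++ reachable_pages o graph (depth - 1)) := by
            rw [List.flatMap_map]
            rfl
          rw [hpushed]
          have hsem : pvSem graph (node, depth, emit) =
              (if emit then [node] else []) ++ outs.flatMap (fun o =>
                (if o != node then [o] else []) ++ reachable_pages o graph (depth - 1)) := by
            simp [pvSem, pv_A_step node graph depth hd outs hget]
          rw [hsem, hres1]
          simp

-- ===== VERDICT (by name: the statement is the Claim_ definition above) =====
theorem reachable_pages_spec : Claim_equal_reachable_pages := by
  intro page graph k _ _
  unfold Spec_reachable_pages reachable_pages_alt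
  rw [pv_run_eq graph _ _ [] (by simp [pvMeasure, pvWeight])]
  simp [pvSem]
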